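-- pv_equiv track=rewrite | github.com/squishyjs/daily-solve | Python/notVerySecure.py | adjacent_double_double_letters
-- ===== SOURCE A (Python) =====
-- def adjacent_double_double_letters(word: str) -> bool:
--
--     string_length = len(word)
--     for i in range(string_length - 3):
--         current_letter = word[i]
--         if current_letter == word[i + 1]:
--             if word[i + 2] == word[i + 3]:
--                 return True
--     return False
-- ===== SOURCE B (Python) =====
-- def adjacent_double_double_letters(word: str) -> bool:
--     doubles = {j for j in range(len(word) - 1) if word[j] == word[j + 1]}
--     return any(j + 2 in doubles for j in doubles)
-- ===== Notes on version B (the rewrite author's own statement) =====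
-- stated objective: alternative
-- what changed: Two-phase index-table approach: first collect the set of all indices starting an adjacent-equal pair, then check whether some such index has another one two positions later, instead of A's single indexed scan with nested conditionals and early return.
import Mathlib
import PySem

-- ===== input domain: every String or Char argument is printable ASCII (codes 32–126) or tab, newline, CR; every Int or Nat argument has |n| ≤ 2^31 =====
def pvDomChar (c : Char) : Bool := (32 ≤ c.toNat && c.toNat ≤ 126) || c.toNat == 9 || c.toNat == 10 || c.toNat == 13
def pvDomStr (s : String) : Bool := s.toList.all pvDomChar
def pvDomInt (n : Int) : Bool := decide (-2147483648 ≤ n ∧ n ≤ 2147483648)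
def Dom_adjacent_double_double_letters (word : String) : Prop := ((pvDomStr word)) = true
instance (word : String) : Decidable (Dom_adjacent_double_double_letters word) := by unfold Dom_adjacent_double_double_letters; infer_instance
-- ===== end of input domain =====

-- B separates the work into two phases (collect the set of double-pair indices, then look
-- for two of them two apart) instead of A's single indexed scan; same cost (alternative).

-- ===== PORT A =====
-- all indexed accesses are in range (i ≤ len-4), so pyGetD's default is never used
def adjacent_double_double_letters (word : String) : Bool :=
  let cs := word.toList
  let n : Int := cs.length
  (PySem.List.pyRange 0 (n - 3) 1).any (fun i =>
    if PySem.List.pyGetD cs i ' ' = PySem.List.pyGetD cs (i + 1) ' ' then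
      (if PySem.List.pyGetD cs (i + 2) ' ' = PySem.List.pyGetD cs (i + 3) ' ' then true else false)
    else false)

-- ===== PORT B =====
-- all indexed accesses are in range (j ≤ len-2), so pyGetD's default is never used
def adjacent_double_double_letters_alt (word : String) : Bool :=
  let cs := word.toList
  let n : Int := cs.length
  let doubles : PySem.Set Int :=
    PySem.Set.ofList ((PySem.List.pyRange 0 (n - 1) 1).filter (fun j =>
      decide (PySem.List.pyGetD cs j ' ' = PySem.List.pyGetD cs (j + 1) ' ')))
  doubles.any (fun j => PySem.Set.contains doubles (j + 2))

-- ===== PRECONDITION & SPEC =====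
def Spec_adjacent_double_double_letters (word : String) (out : Bool) : Prop := out = adjacent_double_double_letters_alt word
instance (word : String) (out : Bool) : Decidable (Spec_adjacent_double_double_letters word out) := by unfold Spec_adjacent_double_double_letters; infer_instance

-- ===== CLAIM (what is proved, stated in full; the proofs are below) =====
def Claim_equal_adjacent_double_double_letters : Prop := ∀ (word : String), Dom_adjacent_double_double_letters word → Spec_adjacent_double_double_letters word (adjacent_double_double_letters word)

-- ===== LEMMAS AND PROOFS =====

theorem adjacent_equal (word : String) :
    adjacent_double_double_letters word = adjacent_double_double_letters_alt word := by
  unfold adjacent_double_double_letters adjacent_double_double_letters_alt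
  rw [Bool.eq_iff_iff]
  simp only [List.any_eq_true, PySem.List.mem_pyRange_one, PySem.Set.contains,
    List.contains_eq_mem, PySem.Set.mem_ofList, List.mem_filter, decide_eq_true_eq, Bool.if_false_right, Bool.and_eq_true]
  constructor
  · rintro ⟨i, ⟨h0, h3⟩, h1, h2, -⟩
    exact ⟨i, ⟨⟨h0, by omega⟩, h1⟩, ⟨by omega, by omega⟩,
      by rw [show i + 2 + (1:Int) = i + 3 by ring]; exact h2⟩
  · rintro ⟨j, ⟨⟨h0, h1'⟩, hd1⟩, ⟨⟨-, h2'⟩, hd2⟩⟩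
    exact ⟨j, ⟨h0, by omega⟩, hd1,
      by rw [show j + (3:Int) = j + 2 + 1 by ring]; exact hd2, trivial⟩

-- ===== VERDICT (by name: the statement is the Claim_ definition above) =====
theorem adjacent_double_double_letters_spec : Claim_equal_adjacent_double_double_letters := by
  intro word _
  unfold Spec_adjacent_double_double_letters
  exact adjacent_equal word
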